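-- pv_equiv track=rewrite | github.com/gaetano-7/FDP1 | Esami Tracce + Soluzioni/Soluzioni Prof/es1-scritto-11-02-21-rogo.py | ovest
-- ===== SOURCE A (Python) =====
-- def ovest(n,m,matrice):
--     for j in range(m-1,0,-1):
--         for i in range(n):
--             if matrice[i][j] == 0 or matrice[i][j] == 3:
--                 if i>0 and matrice[i-1][j-1] == 1:
--                     matrice[i-1][j-1] = 3
--                 if matrice[i][j-1] == 1:
--                     matrice[i][j-1] = 3
--                 if i<n-1 and matrice[i+1][j-1] == 1:
--                     matrice[i+1][j-1] = 3
--     return matrice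
-- ===== SOURCE B (Python) =====
-- def ovest(n, m, matrice):
--     # Dynamic programming with a rolling "burning front" boolean vector:
--     # burn[r] says the cell of the previous (right) column in row r is 0 or 3
--     # after that column was processed.  Each cell is read once; the matrix is
--     # never re-scanned for fire sources.  Mutates matrice in place, like A.
--     if n <= 0 or m <= 1:
--         return matrice
--     burn = [matrice[r][m - 1] == 0 or matrice[r][m - 1] == 3 for r in range(n)]
--     for c in range(m - 2, -1, -1):
--         front = [False] * n
--         for r in range(n):
--             v = matrice[r][c]
--             if v == 1 and (burn[r] or (r > 0 and burn[r - 1]) or (r + 1 < n and burn[r + 1])):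
--                 matrice[r][c] = 3
--                 front[r] = True
--             else:
--                 front[r] = v == 0 or v == 3
--         burn = front
--     return matrice
-- ===== Notes on version B (the rewrite author's own statement) =====
-- stated objective: alternative
-- what changed: Replaces A's in-place scatter, which re-reads the mutated matrix for fire sources around every cell, with a right-to-left dynamic programming sweep that carries a rolling boolean 'burning front' vector between columns, reading each matrix cell exactly once and never re-scanning the matrix for sources.
import Mathlib
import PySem

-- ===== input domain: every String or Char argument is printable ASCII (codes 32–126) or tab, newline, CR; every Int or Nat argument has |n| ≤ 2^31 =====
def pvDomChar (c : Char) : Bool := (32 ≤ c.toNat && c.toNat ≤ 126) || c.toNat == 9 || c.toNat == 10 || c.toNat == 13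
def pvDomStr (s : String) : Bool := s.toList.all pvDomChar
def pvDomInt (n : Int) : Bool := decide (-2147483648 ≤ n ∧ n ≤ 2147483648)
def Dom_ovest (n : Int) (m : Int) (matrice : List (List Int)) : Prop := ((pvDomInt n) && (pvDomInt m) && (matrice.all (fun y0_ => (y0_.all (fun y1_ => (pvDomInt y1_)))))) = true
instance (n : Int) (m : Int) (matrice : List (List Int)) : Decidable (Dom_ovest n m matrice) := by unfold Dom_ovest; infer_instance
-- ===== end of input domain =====

-- B replaces A's in-place scatter (re-reading the mutated matrix for sources) by a right-to-left
-- DP sweep carrying a rolling boolean "burning front" vector; both Pythons mutate `matrice` in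
-- place and return it, and the equivalence proved here is about the return value.

-- matrix read/write helpers (Python indexing matches getD/set on the in-range inputs of Pre_)
def mget (mat : List (List Int)) (i j : Nat) : Int := (mat.getD i []).getD j 0
def mset (mat : List (List Int)) (i j : Nat) (v : Int) : List (List Int) :=
  mat.set i ((mat.getD i []).set j v)

-- ===== PORT A =====
-- one iteration of A's inner loop: source cell (i, j) pushes to (i-1,j-1), (i,j-1), (i+1,j-1)
def stepA (n : Int) (j : Int) (mat : List (List Int)) (i : Int) : List (List Int) :=
  if mget mat i.toNat j.toNat == 0 || mget mat i.toNat j.toNat == 3 then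
    let mat1 := if i > 0 && mget mat (i.toNat - 1) (j.toNat - 1) == 1
                then mset mat (i.toNat - 1) (j.toNat - 1) 3 else mat
    let mat2 := if mget mat1 i.toNat (j.toNat - 1) == 1
                then mset mat1 i.toNat (j.toNat - 1) 3 else mat1
    if i < n - 1 && mget mat2 (i.toNat + 1) (j.toNat - 1) == 1
    then mset mat2 (i.toNat + 1) (j.toNat - 1) 3 else mat2
  else mat

def ovest (n : Int) (m : Int) (matrice : List (List Int)) : List (List Int) :=
  (PySem.List.pyRange (m - 1) 0 (-1)).foldl
    (fun mat j => (PySem.List.pyRange 0 n 1).foldl (fun mat i => stepA n j mat i) mat)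
    matrice

-- ===== PORT B =====
-- one iteration of B's inner loop over destination rows: state is (matrix, front being built);
-- `burn` is the burning-front vector of the column to the right, fixed during the pass
def innerB (n : Int) (c : Int) (burn : List Bool) (st : List (List Int) × List Bool)
    (r : Int) : List (List Int) × List Bool :=
  let v := mget st.1 r.toNat c.toNat
  if v == 1 && (burn.getD r.toNat false || (r > 0 && burn.getD (r.toNat - 1) false) ||
                (r + 1 < n && burn.getD (r.toNat + 1) false))
  then (mset st.1 r.toNat c.toNat 3, st.2.set r.toNat true)
  else (st.1, st.2.set r.toNat (v == 0 || v == 3))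

-- one column of B: consume the front of column c+1, produce the matrix and the front of column c
def passB (n : Int) (st : List (List Int) × List Bool) (c : Int) :
    List (List Int) × List Bool :=
  (PySem.List.pyRange 0 n 1).foldl (innerB n c st.2) (st.1, List.replicate n.toNat false)

def ovest_alt (n : Int) (m : Int) (matrice : List (List Int)) : List (List Int) :=
  if n ≤ 0 || m ≤ 1 then matrice
  else
    let burn0 := (PySem.List.pyRange 0 n 1).map
      (fun r => mget matrice r.toNat (m - 1).toNat == 0 || mget matrice r.toNat (m - 1).toNat == 3)
    ((PySem.List.pyRange (m - 2) (-1) (-1)).foldl (passB n) (matrice, burn0)).1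

-- ===== PRECONDITION & SPEC =====
-- Pre_ excludes exactly the inputs on which Python A raises IndexError:
-- when both loops run (m > 1 and n > 0), the matrix must have at least n rows and each of its first n rows at least m entries.
def Pre_ovest (n : Int) (m : Int) (matrice : List (List Int)) : Prop :=
  1 < m → 0 < n →
    n ≤ (matrice.length : Int) ∧ ∀ row ∈ matrice.take n.toNat, m ≤ (row.length : Int)
instance (n : Int) (m : Int) (matrice : List (List Int)) : Decidable (Pre_ovest n m matrice) := by
  unfold Pre_ovest; infer_instance

def pvWitness_ovest : Int × Int × List (List Int) :=
  (3, 3, [[1, 1, 0], [1, 1, 1], [1, 1, 3]])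

def Spec_ovest (n : Int) (m : Int) (matrice : List (List Int)) (out : List (List Int)) : Prop := out = ovest_alt n m matrice
instance (n : Int) (m : Int) (matrice : List (List Int)) (out : List (List Int)) : Decidable (Spec_ovest n m matrice out) := by unfold Spec_ovest; infer_instance

-- ===== CLAIM (what is proved, stated in full; the proofs are below) =====
def Claim_equal_ovest : Prop := ∀ (n : Int) (m : Int) (matrice : List (List Int)), Dom_ovest n m matrice → Pre_ovest n m matrice → Spec_ovest n m matrice (ovest n m matrice)

-- ===== LEMMAS AND PROOFS =====

-- row-level read (Python row[d] for in-range d)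
def rget (row : List Int) (d : Nat) : Int := row.getD d 0

-- fire test relative to a matrix, column jN
def srcN (mat : List (List Int)) (jN s : Nat) : Bool :=
  mget mat s jN == 0 || mget mat s jN == 3

-- which sources (strictly below k) have already fired at destination row r (A's scatter order)
def okA (mat : List (List Int)) (n jN k r : Nat) : Bool :=
  (decide (1 ≤ r) && decide (r - 1 < k) && decide (r < n) && srcN mat jN (r - 1)) ||
  (decide (r < k) && decide (r < n) && srcN mat jN r) ||
  (decide (r + 1 < k) && decide (r + 1 < n) && srcN mat jN (r + 1))

-- B's full neighbour test at destination row r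
def okB (mat : List (List Int)) (n jN r : Nat) : Bool :=
  (decide (1 ≤ r) && srcN mat jN (r - 1)) || srcN mat jN r ||
  (decide (r + 1 < n) && srcN mat jN (r + 1))

def condK (mat : List (List Int)) (n jN k r : Nat) (row : List Int) : Bool :=
  (rget row (jN - 1) == 1) && okA mat n jN k r

-- the state of the matrix after A has processed sources 0..k-1 of column jN
def AS (mat : List (List Int)) (n jN k : Nat) : List (List Int) :=
  mat.mapIdx (fun r row => if condK mat n jN k r row then row.set (jN - 1) 3 else row)

def condB (mat : List (List Int)) (n jN k r : Nat) (row : List Int) : Bool :=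
  decide (r < k) && decide (r < n) && (rget row (jN - 1) == 1) && okB mat n jN r

-- the state of the matrix after rows 0..k-1 of column jN-1 have been (conditionally) burnt
def BS (mat : List (List Int)) (n jN k : Nat) : List (List Int) :=
  mat.mapIdx (fun r row => if condB mat n jN k r row then row.set (jN - 1) 3 else row)

-- the burning-front vector of column jN relative to matrix state mat
def burnSpec (mat : List (List Int)) (nN jN : Nat) : List Bool :=
  (List.range nN).map (fun s => srcN mat jN s)

-- B's conversion test at row r (full neighbourhood, source column jN)
def condFull (mat : List (List Int)) (nN jN r : Nat) (row : List Int) : Bool :=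
  (rget row (jN - 1) == 1) && okB mat nN jN r

-- the `front` vector after B has processed rows 0..k-1
def nxtS (mat : List (List Int)) (nN jN k : Nat) : List Bool :=
  (List.range nN).map
    (fun r => decide (r < k) && (condFull mat nN jN r (mat.getD r []) || srcN mat (jN - 1) r))

theorem getElem?_mset (T : List (List Int)) (a b : Nat) (v : Int) (r : Nat) :
    (mset T a b v)[r]? = if r = a then T[r]?.map (fun row => row.set b v) else T[r]? := by
  unfold mset
  rw [List.getElem?_set]
  by_cases h : a = r
  · subst h
    by_cases hl : a < T.length
    · simp [hl]
    · simp [hl]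
  · simp [h, Ne.symm h]

theorem rget_eq_one_lt {row : List Int} {d : Nat} (h : (rget row d == 1) = true) :
    d < row.length := by
  by_contra hd
  unfold rget at h
  rw [List.getD_eq_default row 0 (by omega)] at h
  simp at h

theorem rget_set_self {row : List Int} {d : Nat} (h : d < row.length) :
    rget (row.set d (3 : Int)) d = 3 := by
  unfold rget
  rw [List.getD_eq_getElem _ 0 (by simpa using h)]
  simp

theorem rget_set_ne (row : List Int) {d e : Nat} (v : Int) (h : d ≠ e) :
    rget (row.set d v) e = rget row e := by
  unfold rget
  by_cases he : e < row.length
  · rw [List.getD_eq_getElem _ 0 (by simpa using he), List.getD_eq_getElem _ 0 he]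
    simp [List.getElem_set_ne h]
  · rw [List.getD_eq_default _ 0 (by simpa using (show ¬ e < row.length by omega)),
        List.getD_eq_default _ 0 (by omega)]

theorem getD_of_getElem? {T : List (List Int)} {r : Nat} {row : List Int}
    (h : T[r]? = some row) : T.getD r [] = row := by
  rw [List.getD_eq_getElem?_getD, h]; rfl

theorem mget_eq_rget (T : List (List Int)) (r c : Nat) :
    mget T r c = rget (T.getD r []) c := rfl

-- mget of a mapIdx state that only writes column d agrees with the base in any other column c
theorem mget_setcol (mat : List (List Int)) (g : Nat → List Int → Bool) (d s c : Nat)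
    (h : d ≠ c) :
    mget (mat.mapIdx (fun r row => if g r row then row.set d 3 else row)) s c = mget mat s c := by
  unfold mget
  by_cases hs : s < mat.length
  · rw [List.getD_eq_getElem _ [] (by simpa using hs), List.getD_eq_getElem _ [] hs]
    rw [List.getElem_mapIdx]
    by_cases hc : g s mat[s] = true
    · rw [if_pos hc]
      exact rget_set_ne _ 3 h
    · rw [if_neg hc]
  · rw [List.getD_eq_default _ [] (by simpa using (show ¬ s < mat.length by omega)),
        List.getD_eq_default _ [] (by omega)]

-- a source read (column jN) through the partial A-state AS agrees with the base matrix
def srcOk (mat : List (List Int)) (s j : Nat) : Bool :=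
  mget mat s j == 0 || mget mat s j == 3

theorem srcOk_AS (mat : List (List Int)) (n jN k s : Nat) (hj : 1 ≤ jN) :
    srcOk (AS mat n jN k) s jN = srcN mat jN s := by
  unfold srcOk srcN AS
  rw [mget_setcol mat _ (jN - 1) s jN (by omega)]

-- burn cell (a, d) if it currently holds 1
def cset (T : List (List Int)) (a d : Nat) : List (List Int) :=
  if mget T a d == 1 then mset T a d 3 else T

-- the row-level effect of cset at result row r
def F (a d r : Nat) (row : List Int) : List Int :=
  if decide (r = a) && (rget row d == 1) then row.set d 3 else row

theorem cset_get (T : List (List Int)) (a d : Nat) (r : Nat) :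
    (cset T a d)[r]? = T[r]?.map (F a d r) := by
  unfold cset F
  by_cases hg : (mget T a d == 1) = true
  · rw [if_pos hg, getElem?_mset]
    by_cases hr : r = a
    · subst hr
      cases hT : T[r]? with
      | none => simp
      | some row =>
        have hrow : rget row d = 1 := by
          rw [mget_eq_rget, getD_of_getElem? hT] at hg; simpa using hg
        simp [hrow]
    · rw [if_neg hr]
      cases hT : T[r]? <;> simp [hr]
  · rw [if_neg hg]
    by_cases hr : r = a
    · subst hr
      cases hT : T[r]? with
      | none => rfl
      | some row =>
        have hrow : ¬ rget row d = 1 := by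
          rw [mget_eq_rget, getD_of_getElem? hT] at hg; simpa using hg
        simp [hrow]
    · cases hT : T[r]? <;> simp [hr]

-- stepA is a guarded chain of three csets
theorem stepA_eq_csets (n j : Int) (T : List (List Int)) (i : Int) :
    stepA n j T i =
      if srcOk T i.toNat j.toNat then
        (if i < n - 1 then
          cset (cset (if 0 < i then cset T (i.toNat - 1) (j.toNat - 1) else T)
            i.toNat (j.toNat - 1)) (i.toNat + 1) (j.toNat - 1)
        else
          cset (if 0 < i then cset T (i.toNat - 1) (j.toNat - 1) else T)
            i.toNat (j.toNat - 1))
      else T := by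
  unfold stepA srcOk cset
  by_cases h0 : (mget T i.toNat j.toNat == 0 || mget T i.toNat j.toNat == 3) = true
  · rw [if_pos h0, if_pos h0]
    by_cases h1 : 0 < i <;> by_cases h3 : i < n - 1 <;>
      simp [gt_iff_lt, h1, h3]
  · rw [if_neg h0, if_neg h0]

theorem F_ne {a r : Nat} (d : Nat) (row : List Int) (h : ¬ r = a) : F a d r row = row := by
  simp [F, h]

theorem F_or (a b d r : Nat) (row : List Int) (hab : a ≠ b) :
    F b d r (F a d r row) =
      if (decide (r = a) || decide (r = b)) && (rget row d == 1) then row.set d 3 else row := by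
  by_cases e1 : r = a
  · subst e1
    by_cases hv : rget row d = 1
    · simp [F, hv, (by omega : ¬ r = b)]
    · simp [F, hv, (by omega : ¬ r = b)]
  · by_cases e2 : r = b
    · subst e2
      by_cases hv : rget row d = 1 <;> simp [F, e1, hv]
    · simp [F, e1, e2]

theorem F_or3 (a b c d r : Nat) (row : List Int) (hab : a ≠ b) (hbc : b ≠ c) (hac : a ≠ c) :
    F c d r (F b d r (F a d r row)) =
      if (decide (r = a) || decide (r = b) || decide (r = c)) && (rget row d == 1)
      then row.set d 3 else row := by
  rw [F_or a b d r row hab]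
  by_cases hv : rget row d = 1
  · by_cases e12 : r = a ∨ r = b
    · have hne : ¬ r = c := by omega
      have : (decide (r = a) || decide (r = b)) = true := by
        rcases e12 with h | h <;> simp [h]
      rw [this]
      simp only [Bool.true_and]
      rw [if_pos (by simp [hv]), F_ne d _ hne]
      rw [if_pos (by rcases e12 with h | h <;> simp [h, hv])]
    · have h1 : ¬ r = a := by tauto
      have h2 : ¬ r = b := by tauto
      simp [F, h1, h2, hv]
  · simp [F, hv]

theorem stepA_get (n j : Int) (T : List (List Int)) (i : Int) (r : Nat) :
    (stepA n j T i)[r]? = T[r]?.map (fun row =>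
      if srcOk T i.toNat j.toNat &&
         ((decide (0 < i) && decide (r = i.toNat - 1)) || decide (r = i.toNat) ||
          (decide (i < n - 1) && decide (r = i.toNat + 1))) &&
         (rget row (j.toNat - 1) == 1)
      then row.set (j.toNat - 1) 3 else row) := by
  rw [stepA_eq_csets]
  by_cases h0 : srcOk T i.toNat j.toNat = true
  · rw [if_pos h0]
    by_cases h1 : 0 < i <;> by_cases h3 : i < n - 1
    · rw [if_pos h3, if_pos h1, cset_get, cset_get, cset_get]
      cases hT : T[r]? with
      | none => rfl
      | some row =>
        simp only [Option.map_some]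
        rw [F_or3 (i.toNat - 1) i.toNat (i.toNat + 1) (j.toNat - 1) r row
          (by omega) (by omega) (by omega)]
        simp [h0, h1, h3]
    · rw [if_neg h3, if_pos h1, cset_get, cset_get]
      cases hT : T[r]? with
      | none => rfl
      | some row =>
        simp only [Option.map_some]
        rw [F_or (i.toNat - 1) i.toNat (j.toNat - 1) r row (by omega)]
        simp [h0, h1, h3]
    · rw [if_pos h3, if_neg h1, cset_get, cset_get]
      cases hT : T[r]? with
      | none => rfl
      | some row =>
        simp only [Option.map_some]
        rw [F_or i.toNat (i.toNat + 1) (j.toNat - 1) r row (by omega)]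
        simp [h0, h1, h3]
    · rw [if_neg h3, if_neg h1, cset_get]
      cases hT : T[r]? with
      | none => rfl
      | some row =>
        simp only [Option.map_some]
        simp [F, h0, h1, h3]
  · rw [if_neg h0]
    cases hT : T[r]? with
    | none => rfl
    | some row =>
      simp only [Option.map_some]
      simp [show srcOk T i.toNat j.toNat = false by simpa using h0]

theorem okA_succ (mat : List (List Int)) (n jN k r : Nat) (hk : k < n) :
    okA mat n jN (k + 1) r =
      (okA mat n jN k r ||
        (((decide (0 < k) && decide (r = k - 1)) || decide (r = k) ||
          (decide (k + 1 < n) && decide (r = k + 1))) && srcN mat jN k)) := by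
  by_cases e1 : r + 1 = k
  · subst e1
    obtain h1 | h1 := Bool.eq_false_or_eq_true (srcN mat jN (r - 1)) <;>
    obtain h2 | h2 := Bool.eq_false_or_eq_true (srcN mat jN r) <;>
    obtain h3 | h3 := Bool.eq_false_or_eq_true (srcN mat jN (r + 1)) <;>
    · rw [Bool.eq_iff_iff]
      simp [okA, h1, h2, h3] <;> omega
  · by_cases e2 : r = k
    · subst e2
      obtain h1 | h1 := Bool.eq_false_or_eq_true (srcN mat jN (r - 1)) <;>
      obtain h2 | h2 := Bool.eq_false_or_eq_true (srcN mat jN r) <;>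
      obtain h3 | h3 := Bool.eq_false_or_eq_true (srcN mat jN (r + 1)) <;>
      · rw [Bool.eq_iff_iff]
        simp [okA, h1, h2, h3] <;> omega
    · by_cases e3 : r = k + 1
      · subst e3
        obtain h1 | h1 := Bool.eq_false_or_eq_true (srcN mat jN k) <;>
        obtain h2 | h2 := Bool.eq_false_or_eq_true (srcN mat jN (k + 1)) <;>
        obtain h3 | h3 := Bool.eq_false_or_eq_true (srcN mat jN (k + 1 + 1)) <;>
        · rw [Bool.eq_iff_iff]
          simp [okA, show k + 1 - 1 = k from rfl, h1, h2, h3] <;> omega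
      · obtain h1 | h1 := Bool.eq_false_or_eq_true (srcN mat jN (r - 1)) <;>
        obtain h2 | h2 := Bool.eq_false_or_eq_true (srcN mat jN r) <;>
        obtain h3 | h3 := Bool.eq_false_or_eq_true (srcN mat jN (r + 1)) <;>
        obtain hk' | hk' := Bool.eq_false_or_eq_true (srcN mat jN k) <;>
        · rw [Bool.eq_iff_iff]
          simp [okA, h1, h2, h3, hk'] <;> omega

theorem okA_n (mat : List (List Int)) (n jN r : Nat) :
    okA mat n jN n r = (decide (r < n) && okB mat n jN r) := by
  obtain h1 | h1 := Bool.eq_false_or_eq_true (srcN mat jN (r - 1)) <;>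
  obtain h2 | h2 := Bool.eq_false_or_eq_true (srcN mat jN r) <;>
  obtain h3 | h3 := Bool.eq_false_or_eq_true (srcN mat jN (r + 1)) <;>
  · rw [Bool.eq_iff_iff]
    simp [okA, okB, h1, h2, h3] <;> omega

theorem mapIdx_id' (l : List (List Int)) : List.mapIdx (fun _ row => row) l = l := by
  induction l with
  | nil => rfl
  | cons x xs ih => simp [List.mapIdx_cons, ih]

theorem AS_zero (mat : List (List Int)) (n jN : Nat) : AS mat n jN 0 = mat := by
  unfold AS condK okA
  simp [mapIdx_id']

theorem BS_zero (mat : List (List Int)) (n jN : Nat) : BS mat n jN 0 = mat := by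
  unfold BS condB
  simp [mapIdx_id']

theorem getElem?_AS (mat : List (List Int)) (n jN k r : Nat) :
    (AS mat n jN k)[r]? =
      mat[r]?.map (fun row => if condK mat n jN k r row then row.set (jN - 1) 3 else row) := by
  simp [AS, List.getElem?_mapIdx]

theorem getElem?_BS (mat : List (List Int)) (n jN k r : Nat) :
    (BS mat n jN k)[r]? =
      mat[r]?.map (fun row => if condB mat n jN k r row then row.set (jN - 1) 3 else row) := by
  simp [BS, List.getElem?_mapIdx]

-- A's k-th inner iteration advances the scatter state by one source row
theorem AS_succ (mat : List (List Int)) (n j : Int) (k : Nat) (hj : 1 ≤ j)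
    (hk : k < n.toNat) :
    stepA n j (AS mat n.toNat j.toNat k) (k : Int) = AS mat n.toNat j.toNat (k + 1) := by
  apply List.ext_getElem?
  intro r
  rw [stepA_get, getElem?_AS, getElem?_AS, Option.map_map]
  cases hT : mat[r]? with
  | none => rfl
  | some row =>
    simp only [Option.map_some, Function.comp]
    rw [show ((k : Int)).toNat = k from Int.toNat_natCast k]
    rw [srcOk_AS mat n.toNat j.toNat k k (by omega)]
    rw [show (decide ((0 : Int) < (k : Int))) = decide (0 < k) from
          decide_eq_decide.mpr (by omega),
        show (decide ((k : Int) < n - 1)) = decide (k + 1 < n.toNat) from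
          decide_eq_decide.mpr (by omega)]
    by_cases hc : condK mat n.toNat j.toNat k r row = true
    · rw [if_pos hc]
      have hv : rget row (j.toNat - 1) = 1 := by
        have h' := hc
        simp only [condK, Bool.and_eq_true, beq_iff_eq] at h'
        exact h'.1
      have hlt : j.toNat - 1 < row.length := rget_eq_one_lt (by simp [hv])
      have h3 : rget (row.set (j.toNat - 1) 3) (j.toNat - 1) = 3 := rget_set_self hlt
      have hok : condK mat n.toNat j.toNat (k + 1) r row = true := by
        simp only [condK, okA_succ mat n.toNat j.toNat k r hk, Bool.and_eq_true,
          Bool.or_eq_true] at hc ⊢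
        exact ⟨hc.1, Or.inl hc.2⟩
      rw [if_neg (by simp [h3]), if_pos hok]
    · rw [if_neg hc]
      by_cases hv : rget row (j.toNat - 1) = 1
      · have hokk : okA mat n.toNat j.toNat k r = false := by
          obtain h | h := Bool.eq_false_or_eq_true (okA mat n.toNat j.toNat k r)
          · exact absurd (show condK mat n.toNat j.toNat k r row = true by
              simp [condK, hv, h]) hc
          · exact h
        simp [condK, okA_succ mat n.toNat j.toNat k r hk, hokk, hv, Bool.and_comm]
      · have hv' : (rget row (j.toNat - 1) == 1) = false := by simp [hv]
        have hcond : condK mat n.toNat j.toNat (k + 1) r row = false := by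
          simp [condK, hv']
        simp [hv', hcond]

theorem foldA_aux (mat : List (List Int)) (n j : Int) (hj : 1 ≤ j) :
    ∀ t, t ≤ n.toNat →
      (List.range t).foldl (fun m (k : Nat) => stepA n j m (k : Int)) mat =
        AS mat n.toNat j.toNat t := by
  intro t
  induction t with
  | zero => intro _; simpa using (AS_zero mat n.toNat j.toNat).symm
  | succ t ih =>
    intro ht
    rw [List.range_succ, List.foldl_append, ih (by omega)]
    simpa using AS_succ mat n j t hj (by omega)

theorem okA_n_eq (mat : List (List Int)) (n jN : Nat) :
    AS mat n jN n = BS mat n jN n := by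
  have h : ∀ r row, condK mat n jN n r row = condB mat n jN n r row := by
    intro r row
    unfold condK condB
    rw [okA_n, Bool.eq_iff_iff]
    simp
    tauto
  unfold AS BS
  simp only [h]

-- a full column pass of A, denotationally
theorem passA_eq (n j : Int) (hj : 1 ≤ j) (mat : List (List Int)) :
    (PySem.List.pyRange 0 n 1).foldl (fun m i => stepA n j m i) mat =
      BS mat n.toNat j.toNat n.toNat := by
  rw [PySem.List.pyRange_one, List.foldl_map]
  simp only [zero_add, Int.sub_zero]
  rw [foldA_aux mat n j hj n.toNat (le_refl _)]
  exact okA_n_eq mat n.toNat j.toNat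

-- lookups in the burning-front vector
theorem burnSpec_getD (mat : List (List Int)) (nN jN s : Nat) :
    (burnSpec mat nN jN).getD s false = (decide (s < nN) && srcN mat jN s) := by
  unfold burnSpec
  by_cases hs : s < nN
  · rw [List.getD_eq_getElem _ _ (by simpa using hs)]
    simp [hs]
  · rw [List.getD_eq_default _ _ (by simpa using (show ¬ s < nN by omega))]
    simp [hs]

-- setting entry k of a map-over-range
theorem set_map_range {α : Type} (f : Nat → α) (nN k : Nat) (v : α) :
    ((List.range nN).map f).set k v =
      (List.range nN).map (fun r => if r = k then v else f r) := by
  apply List.ext_getElem?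
  intro i
  by_cases hi : i < nN
  · rw [List.getElem?_set]
    by_cases hik : k = i
    · subst hik
      simp [hi]
    · simp [hi, hik, Ne.symm hik]
  · have h1 : ((List.range nN).map f)[i]? = none :=
      List.getElem?_eq_none (by simpa using hi)
    have h2 : ((List.range nN).map (fun r => if r = k then v else f r))[i]? = none :=
      List.getElem?_eq_none (by simpa using hi)
    rw [List.getElem?_set, h1, h2]
    simp only [ite_eq_right_iff]
    intro hki
    subst hki
    simp only [List.length_map, List.length_range]
    intro h
    omega

-- rows not yet processed are untouched in the BS state
theorem mget_BS_row_ge (mat : List (List Int)) (nN jN k r c : Nat) (h : k ≤ r) :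
    mget (BS mat nN jN k) r c = mget mat r c := by
  unfold mget BS
  by_cases hs : r < mat.length
  · rw [List.getD_eq_getElem _ [] (by simpa using hs), List.getD_eq_getElem _ [] hs]
    rw [List.getElem_mapIdx]
    rw [if_neg (by simp [condB, show ¬ r < k by omega])]
  · rw [List.getD_eq_default _ [] (by simpa using (show ¬ r < mat.length by omega)),
        List.getD_eq_default _ [] (by omega)]

-- advancing the B-state by one conversion
theorem BS_succ_set (mat : List (List Int)) (nN jN k : Nat) (hk : k < nN)
    (hc : condFull mat nN jN k (mat.getD k []) = true) :
    mset (BS mat nN jN k) k (jN - 1) 3 = BS mat nN jN (k + 1) := by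
  apply List.ext_getElem?
  intro r
  rw [getElem?_mset, getElem?_BS, getElem?_BS]
  by_cases hr : r = k
  · subst hr
    rw [if_pos rfl, Option.map_map]
    cases hT : mat[r]? with
    | none => rfl
    | some row =>
      have hrow : mat.getD r [] = row := getD_of_getElem? hT
      rw [hrow] at hc
      simp only [Option.map_some, Function.comp]
      rw [if_neg (by simp [condB])]
      have hcb : condB mat nN jN (r + 1) r row = true := by
        simp only [condB, decide_eq_true (show r < r + 1 by omega), decide_eq_true hk,
          Bool.true_and]
        simpa [condFull] using hc
      rw [if_pos hcb]
  · rw [if_neg hr]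
    cases hT : mat[r]? with
    | none => rfl
    | some row =>
      simp only [Option.map_some]
      have : condB mat nN jN (k + 1) r row = condB mat nN jN k r row := by
        unfold condB
        rw [show (decide (r < k + 1)) = decide (r < k) from decide_eq_decide.mpr (by omega)]
      rw [this]

theorem BS_succ_skip (mat : List (List Int)) (nN jN k : Nat)
    (hc : condFull mat nN jN k (mat.getD k []) = false) :
    BS mat nN jN (k + 1) = BS mat nN jN k := by
  apply List.ext_getElem?
  intro r
  rw [getElem?_BS, getElem?_BS]
  cases hT : mat[r]? with
  | none => rfl
  | some row =>
    simp only [Option.map_some]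
    by_cases hr : r = k
    · have hrow : mat.getD k [] = row := by rw [← hr]; exact getD_of_getElem? hT
      rw [hrow] at hc
      have h1 : condB mat nN jN (k + 1) r row = false := by
        rw [hr]
        cases hrg : (rget row (jN - 1) == 1) <;>
        cases hok : okB mat nN jN k <;>
        simp [condB, hrg, hok] <;> simp [condFull, hrg, hok] at hc
      have h2 : condB mat nN jN k r row = false := by
        simp [condB, hr]
      rw [h1, h2]
    · have : condB mat nN jN (k + 1) r row = condB mat nN jN k r row := by
        unfold condB
        rw [show (decide (r < k + 1)) = decide (r < k) from decide_eq_decide.mpr (by omega)]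
      rw [this]

-- the front update at row k
theorem nxtS_set (mat : List (List Int)) (nN jN k : Nat) (hk : k < nN)
    (b : Bool) (hb : b = (condFull mat nN jN k (mat.getD k []) || srcN mat (jN - 1) k)) :
    (nxtS mat nN jN k).set k b = nxtS mat nN jN (k + 1) := by
  unfold nxtS
  rw [set_map_range]
  apply List.map_congr_left
  intro r _
  by_cases hr : r = k
  · subst hr
    simp [hb]
  · simp only [if_neg hr]
    rw [show (decide (r < k + 1)) = decide (r < k) from decide_eq_decide.mpr (by omega)]

-- B's k-th inner iteration advances the matrix state and the front by one row
theorem innerB_succ (mat : List (List Int)) (n c : Int) (k : Nat) (hc : 0 ≤ c)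
    (hk : k < n.toNat) :
    innerB n c (burnSpec mat n.toNat (c.toNat + 1))
      (BS mat n.toNat (c.toNat + 1) k, nxtS mat n.toNat (c.toNat + 1) k) (k : Int)
    = (BS mat n.toNat (c.toNat + 1) (k + 1), nxtS mat n.toNat (c.toNat + 1) (k + 1)) := by
  have hjm : (c.toNat + 1) - 1 = c.toNat := by omega
  unfold innerB
  simp only [Int.toNat_natCast]
  rw [mget_BS_row_ge mat n.toNat (c.toNat + 1) k k c.toNat (le_refl k)]
  rw [burnSpec_getD, burnSpec_getD, burnSpec_getD]
  rw [show (decide ((k : Int) > 0)) = decide (1 ≤ k) from decide_eq_decide.mpr (by omega),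
      show (decide ((k : Int) + 1 < n)) = decide (k + 1 < n.toNat) from
        decide_eq_decide.mpr (by omega)]
  have hv : mget mat k c.toNat = rget (mat.getD k []) ((c.toNat + 1) - 1) := by
    rw [hjm]; rfl
  rw [hv]
  have hguard :
      ((rget (mat.getD k []) ((c.toNat + 1) - 1) == 1) &&
        ((decide (k < n.toNat) && srcN mat (c.toNat + 1) k) ||
         (decide (1 ≤ k) && (decide (k - 1 < n.toNat) && srcN mat (c.toNat + 1) (k - 1))) ||
         (decide (k + 1 < n.toNat) && (decide (k + 1 < n.toNat) && srcN mat (c.toNat + 1) (k + 1)))))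
      = condFull mat n.toNat (c.toNat + 1) k (mat.getD k []) := by
    unfold condFull okB
    obtain h1 | h1 := Bool.eq_false_or_eq_true (srcN mat (c.toNat + 1) (k - 1)) <;>
    obtain h2 | h2 := Bool.eq_false_or_eq_true (srcN mat (c.toNat + 1) k) <;>
    obtain h3 | h3 := Bool.eq_false_or_eq_true (srcN mat (c.toNat + 1) (k + 1)) <;>
    · rw [Bool.eq_iff_iff]
      simp [h1, h2, h3] <;> omega
  rw [hguard]
  by_cases hg : condFull mat n.toNat (c.toNat + 1) k (mat.getD k []) = true
  · rw [if_pos hg]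
    have hset := BS_succ_set mat n.toNat (c.toNat + 1) k hk hg
    rw [hjm] at hset
    rw [hset, nxtS_set mat n.toNat (c.toNat + 1) k hk true (by rw [hg, Bool.true_or])]
  · rw [if_neg hg]
    have hgf : condFull mat n.toNat (c.toNat + 1) k (mat.getD k []) = false := by
      simpa using hg
    rw [BS_succ_skip mat n.toNat (c.toNat + 1) k hgf]
    rw [nxtS_set mat n.toNat (c.toNat + 1) k hk _ (by
      rw [hgf]
      simp only [Bool.false_or]
      unfold srcN
      rw [mget_eq_rget, hjm])]

theorem nxtS_zero (mat : List (List Int)) (nN jN : Nat) :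
    nxtS mat nN jN 0 = List.replicate nN false := by
  unfold nxtS
  simp

theorem foldB_aux (mat : List (List Int)) (n c : Int) (hc : 0 ≤ c) :
    ∀ t, t ≤ n.toNat →
      (List.range t).foldl
        (fun st (k : Nat) => innerB n c (burnSpec mat n.toNat (c.toNat + 1)) st (k : Int))
        (mat, List.replicate n.toNat false)
      = (BS mat n.toNat (c.toNat + 1) t, nxtS mat n.toNat (c.toNat + 1) t) := by
  intro t
  induction t with
  | zero =>
    intro _
    simp [BS_zero, nxtS_zero]
  | succ t ih =>
    intro ht
    rw [List.range_succ, List.foldl_append, ih (by omega)]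
    simpa using innerB_succ mat n c t hc (by omega)

-- the finished front of a pass is the burning front of the written column
theorem nxtS_full (mat : List (List Int)) (nN jN : Nat) (hj : 1 ≤ jN) :
    nxtS mat nN jN nN = burnSpec (BS mat nN jN nN) nN (jN - 1) := by
  unfold nxtS burnSpec
  apply List.map_congr_left
  intro r hr
  have hrn : r < nN := List.mem_range.mp hr
  rw [show (decide (r < nN)) = true from by simp [hrn], Bool.true_and]
  unfold srcN
  rw [mget_eq_rget, mget_eq_rget]
  by_cases hs : r < mat.length
  · have hT : mat[r]? = some mat[r] := List.getElem?_eq_getElem hs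
    have hBS : (BS mat nN jN nN).getD r [] =
        (if condB mat nN jN nN r mat[r] then mat[r].set (jN - 1) 3 else mat[r]) := by
      apply getD_of_getElem?
      rw [getElem?_BS, hT, Option.map_some]
    have hrow : mat.getD r [] = mat[r] := getD_of_getElem? hT
    rw [hBS, hrow]
    have hcb : condB mat nN jN nN r mat[r] = condFull mat nN jN r mat[r] := by
      unfold condB condFull
      simp [hrn]
    rw [hcb]
    by_cases hcf : condFull mat nN jN r mat[r] = true
    · rw [if_pos hcf, hcf]
      have hv : (rget mat[r] (jN - 1) == 1) = true := by
        simp only [condFull, Bool.and_eq_true] at hcf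
        exact hcf.1
      have hlt : jN - 1 < mat[r].length := rget_eq_one_lt hv
      rw [rget_set_self hlt]
      simp
    · have hcf' : condFull mat nN jN r mat[r] = false := by simpa using hcf
      rw [if_neg hcf, hcf']
      simp
  · have hT : mat[r]? = none := List.getElem?_eq_none (by omega)
    have hrow : mat.getD r [] = [] := by
      rw [List.getD_eq_getElem?_getD, hT]; rfl
    have hBS : (BS mat nN jN nN).getD r [] = [] := by
      rw [List.getD_eq_getElem?_getD, getElem?_BS, hT]; rfl
    rw [hBS, hrow]
    simp [condFull, rget]

-- one full pass of B, from a correct burning front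
theorem passB_eq (mat : List (List Int)) (n c : Int) (hc : 0 ≤ c) :
    passB n (mat, burnSpec mat n.toNat (c.toNat + 1)) c
      = (BS mat n.toNat (c.toNat + 1) n.toNat,
         burnSpec (BS mat n.toNat (c.toNat + 1) n.toNat) n.toNat c.toNat) := by
  unfold passB
  rw [PySem.List.pyRange_one, List.foldl_map]
  simp only [zero_add, Int.sub_zero]
  rw [foldB_aux mat n c hc n.toNat (le_refl _)]
  have h := nxtS_full mat n.toNat (c.toNat + 1) (by omega)
  rw [show (c.toNat + 1) - 1 = c.toNat from by omega] at h
  rw [h]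

-- the outer sweep: A over columns t..1 equals B over columns t-1..0 carrying the front
theorem outer_eq (n : Int) :
    ∀ (t : Nat) (mat : List (List Int)),
      (PySem.List.pyRange (t : Int) 0 (-1)).foldl
        (fun M j => (PySem.List.pyRange 0 n 1).foldl (fun M i => stepA n j M i) M) mat
      = ((PySem.List.pyRange ((t : Int) - 1) (-1) (-1)).foldl (passB n)
          (mat, burnSpec mat n.toNat t)).1 := by
  intro t
  induction t with
  | zero =>
    intro mat
    rw [PySem.List.pyRange_neg_one_eq_nil (by omega),
        PySem.List.pyRange_neg_one_eq_nil (by omega)]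
    rfl
  | succ t ih =>
    intro mat
    have e : ((t + 1 : Nat) : Int) - 1 = ((t : Nat) : Int) := by push_cast; ring
    have h1 : PySem.List.pyRange ((t + 1 : Nat) : Int) 0 (-1)
        = ((t + 1 : Nat) : Int) :: PySem.List.pyRange ((t : Nat) : Int) 0 (-1) := by
      rw [PySem.List.pyRange_neg_one_cons (by push_cast; omega), e]
    rw [h1, e]
    have h2 : PySem.List.pyRange ((t : Nat) : Int) (-1) (-1)
        = ((t : Nat) : Int) :: PySem.List.pyRange (((t : Nat) : Int) - 1) (-1) (-1) :=
      PySem.List.pyRange_neg_one_cons (by omega)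
    rw [h2]
    simp only [List.foldl_cons]
    rw [passA_eq n ((t + 1 : Nat) : Int) (by push_cast; omega) mat]
    have hjt : (((t + 1 : Nat) : Int)).toNat = t + 1 := by omega
    have hct : (((t : Nat) : Int)).toNat = t := by omega
    rw [hjt]
    have hpb := passB_eq mat n ((t : Nat) : Int) (by omega)
    rw [hct] at hpb
    rw [hpb]
    exact ih (BS mat n.toNat (t + 1) n.toNat)

-- degenerate cases: no pass runs
theorem foldl_const_id (L : List Int) (mat : List (List Int)) :
    L.foldl (fun M (_ : Int) => M) mat = mat := by
  induction L generalizing mat with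
  | nil => rfl
  | cons j L ih => simpa using ih mat

theorem foldA_id (n : Int) (hn : n ≤ 0) (L : List Int) (mat : List (List Int)) :
    L.foldl (fun M j => (PySem.List.pyRange 0 n 1).foldl (fun M i => stepA n j M i) M) mat
      = mat := by
  have hfun : (fun (M : List (List Int)) (j : Int) =>
      (PySem.List.pyRange 0 n 1).foldl (fun M i => stepA n j M i) M)
      = fun M (_ : Int) => M := by
    funext M j
    rw [PySem.List.pyRange_one_eq_nil (by omega)]
    rfl
  rw [hfun]
  exact foldl_const_id L mat

theorem ovest_total (n m : Int) (matrice : List (List Int)) :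
    ovest n m matrice = ovest_alt n m matrice := by
  unfold ovest ovest_alt
  by_cases hg : (n ≤ 0 || m ≤ 1) = true
  · rw [if_pos hg]
    simp only [Bool.or_eq_true, decide_eq_true_eq] at hg
    rcases hg with hn | hm
    · exact foldA_id n hn _ matrice
    · rw [PySem.List.pyRange_neg_one_eq_nil (by omega)]
      rfl
  · rw [if_neg hg]
    simp only [Bool.or_eq_true, decide_eq_true_eq, not_or, not_le] at hg
    obtain ⟨hn, hm⟩ := hg
    have ht : ((m - 1).toNat : Int) = m - 1 := by omega
    have hburn : (PySem.List.pyRange 0 n 1).map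
        (fun r => mget matrice r.toNat (m - 1).toNat == 0 ||
                  mget matrice r.toNat (m - 1).toNat == 3)
        = burnSpec matrice n.toNat (m - 1).toNat := by
      rw [PySem.List.pyRange_one, List.map_map]
      simp only [Int.sub_zero]
      unfold burnSpec
      apply List.map_congr_left
      intro k _
      simp only [Int.sub_zero, Function.comp, zero_add, Int.toNat_natCast]
      rfl
    rw [hburn]
    have := outer_eq n (m - 1).toNat matrice
    rw [ht] at this
    rw [show m - 2 = (m - 1) - 1 from by omega]
    exact this

-- ===== VERDICT (by name: the statement is the Claim_ definition above) =====
theorem ovest_spec : Claim_equal_ovest := by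
  intro n m matrice _ _
  exact ovest_total n m matrice
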